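-- pv_equiv track=rewrite | github.com/ReNothingg/Olimpiada | TheFirstStage/D.py | to_second_from_first
-- ===== SOURCE A (Python) =====
-- def to_second_from_first(s):
--     parts = s.split('-')
--     out = []
--     for i, p in enumerate(parts):
--         if i == 0:
--             out.append(p.lower())
--         else:
--             out.append(p[0].upper() + p[1:].lower() if len(p) > 0 else '')
--     return ''.join(out)
-- ===== SOURCE B (Python) =====
-- def to_second_from_first(s):
--     res = []
--     started = False
--     after_hyphen = False
--     for ch in s:
--         if ch == '-':
--             started = True
--             after_hyphen = True
--         else:
--             res.append(ch.upper() if (started and after_hyphen) else ch.lower())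
--             after_hyphen = False
--     return ''.join(res)
-- ===== Notes on version B (the rewrite author's own statement) =====
-- stated objective: alternative
-- what changed: Replaces hyphen-split plus per-part capitalize-and-join by a single character-level pass carrying two flags (started, after_hyphen), building the output directly with no intermediate part lists.
import Mathlib
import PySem

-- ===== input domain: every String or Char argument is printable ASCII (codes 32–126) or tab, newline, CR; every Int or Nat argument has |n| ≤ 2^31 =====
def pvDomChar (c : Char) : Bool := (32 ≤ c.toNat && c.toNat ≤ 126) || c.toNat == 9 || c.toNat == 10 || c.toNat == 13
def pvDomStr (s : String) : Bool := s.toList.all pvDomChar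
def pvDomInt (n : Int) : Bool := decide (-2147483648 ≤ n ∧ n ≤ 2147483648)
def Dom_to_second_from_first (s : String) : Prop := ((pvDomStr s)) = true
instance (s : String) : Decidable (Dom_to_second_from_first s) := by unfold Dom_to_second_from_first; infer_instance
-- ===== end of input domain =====

-- B replaces split-then-capitalize-each-part by a single character-level pass with two flags; objective: alternative (same cost, no intermediate part lists).

-- ===== PORT A =====
-- loop body of A's 'for i, p in enumerate(parts)'
def stepA (out : List (List Char)) (ip : Int × List Char) : List (List Char) :=
  if ip.1 == 0 then out ++ [PySem.Chars.lower ip.2]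
  else out ++ [if PySem.Chars.len ip.2 > 0 then
      ((PySem.Chars.pyGet? ip.2 0).elim [] (fun c => PySem.Chars.upper [c]))
        ++ PySem.Chars.lower (PySem.Chars.slice ip.2 (some 1) none)
    else []]

def to_second_from_first (s : String) : String :=
  let parts := PySem.Chars.splitOn s.toList ['-']
  let out := (PySem.List.enumerate parts).foldl stepA []
  String.ofList (PySem.Chars.join [] out)

-- ===== PORT B =====
-- loop body of B's 'for ch in s' over state (res, started, after_hyphen)
def stepB (st : List Char × Bool × Bool) (ch : Char) : List Char × Bool × Bool :=
  if ch == '-' then (st.1, true, true)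
  else (st.1 ++ [if st.2.1 && st.2.2 then PySem.Chars.upperChar ch else PySem.Chars.lowerChar ch],
        st.2.1, false)

def to_second_from_first_alt (s : String) : String :=
  let st := s.toList.foldl stepB ([], false, false)
  String.ofList st.1

-- ===== PRECONDITION & SPEC =====
def Spec_to_second_from_first (s : String) (out : String) : Prop := out = to_second_from_first_alt s
instance (s : String) (out : String) : Decidable (Spec_to_second_from_first s out) := by unfold Spec_to_second_from_first; infer_instance

-- ===== CLAIM (what is proved, stated in full; the proofs are below) =====
def Claim_equal_to_second_from_first : Prop := ∀ (s : String), Dom_to_second_from_first s → Spec_to_second_from_first s (to_second_from_first s)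

-- ===== LEMMAS AND PROOFS =====

-- split of a char list on '-' : (first piece, remaining pieces)
def split1 : List Char → List Char × List (List Char)
  | [] => ([], [])
  | c :: rest =>
    let r := split1 rest
    if c = '-' then ([], r.1 :: r.2) else (c :: r.1, r.2)

-- what A does to a non-first piece
def capA : List Char → List Char
  | [] => []
  | c :: r => PySem.Chars.upperChar c :: PySem.Chars.lower r

-- B's loop as a structural recursion (started, after_hyphen)
def bGo : Bool → Bool → List Char → List Char
  | _, _, [] => []
  | st, af, c :: rest =>
    if c = '-' then bGo true true rest
    else (if st && af then PySem.Chars.upperChar c else PySem.Chars.lowerChar c) :: bGo st false rest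

lemma enumerate_cons {α : Type} (x : α) (t : List α) (i : Int) :
    PySem.List.enumerate (x :: t) i = (i, x) :: PySem.List.enumerate t (i + 1) := rfl

lemma go_spec (l : List Char) : ∀ (fuel : Nat) (cur : List Char) (acc : List (List Char)),
    l.length ≤ fuel →
    PySem.Chars.splitOn.go ['-'] fuel l cur acc
      = acc.reverse ++ (cur.reverse ++ (split1 l).1) :: (split1 l).2 := by
  induction l with
  | nil =>
    intro fuel cur acc _
    cases fuel <;> simp [PySem.Chars.splitOn.go, split1]
  | cons c rest ih =>
    intro fuel cur acc hf
    cases fuel with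
    | zero => simp at hf
    | succ f =>
      rw [PySem.Chars.splitOn.go.eq_def]
      simp only [List.isPrefixOf, List.length_cons] at *
      by_cases hc : c = '-'
      · simp only [hc, BEq.rfl, Bool.and_eq_true, and_true, if_true,
          List.length_nil, List.drop_succ_cons, List.drop_zero]
        rw [ih f [] (cur.reverse :: acc) (by omega)]
        simp [split1]
      · have hb : (('-' == c) && true) = false := by
          simp only [Bool.and_true, beq_eq_false_iff_ne, ne_eq]
          exact fun h => hc h.symm
        rw [if_neg (by simp [hb])]
        rw [ih f (c :: cur) acc (by omega)]
        simp [split1, hc]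

lemma splitOn_eq (cs : List Char) :
    PySem.Chars.splitOn cs ['-'] = (split1 cs).1 :: (split1 cs).2 := by
  unfold PySem.Chars.splitOn
  simpa using go_spec cs (cs.length + 1) [] [] (by omega)

-- the per-piece expression of A's else-branch equals capA
lemma stepA_pos (out : List (List Char)) (i : Int) (p : List Char) (hi : 1 ≤ i) :
    stepA out (i, p) = out ++ [capA p] := by
  have hne : ((i : Int) == 0) = false := by simp only [beq_eq_false_iff_ne, ne_eq]; omega
  cases p with
  | nil => simp [stepA, hne, PySem.Chars.len, capA]
  | cons c r =>
    simp [stepA, hne, PySem.Chars.len, capA, PySem.List.slice_from_one, PySem.Chars.upper]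

-- A's fold over the non-first pieces appends capA of each
lemma foldA_tail (ps : List (List Char)) : ∀ (i : Int) (acc : List (List Char)), 1 ≤ i →
    (PySem.List.enumerate ps i).foldl stepA acc = acc ++ ps.map capA := by
  induction ps with
  | nil => intro i acc _; simp [PySem.List.enumerate]
  | cons p ps ih =>
    intro i acc hi
    rw [enumerate_cons, List.foldl_cons, stepA_pos _ _ _ hi, ih (i + 1) _ (by omega)]
    simp

lemma join_nil_flatten (l : List (List Char)) : PySem.Chars.join [] l = l.flatten := by
  induction l with
  | nil => simp [PySem.Chars.join, List.intercalate]
  | cons a t ih =>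
    cases t with
    | nil => simp [PySem.Chars.join, List.intercalate]
    | cons b t' =>
      simp only [PySem.Chars.join, List.intercalate] at *
      simp [List.intersperse, ih]

lemma A_chars (s : String) :
    to_second_from_first s
      = String.ofList (PySem.Chars.lower (split1 s.toList).1
          ++ ((split1 s.toList).2.map capA).flatten) := by
  have hA : to_second_from_first s
      = String.ofList (PySem.Chars.join []
          ((PySem.List.enumerate (PySem.Chars.splitOn s.toList ['-'])).foldl stepA [])) := rfl
  rw [hA, splitOn_eq, enumerate_cons, List.foldl_cons]
  have h0 : stepA [] (0, (split1 s.toList).1) = [PySem.Chars.lower (split1 s.toList).1] := by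
    simp [stepA]
  rw [h0, show (0:Int) + 1 = 1 from rfl, foldA_tail _ 1 _ (by omega), join_nil_flatten]
  simp

lemma foldB (l : List Char) : ∀ (res : List Char) (st af : Bool),
    (l.foldl stepB (res, st, af)).1 = res ++ bGo st af l := by
  induction l with
  | nil => intro res st af; simp [bGo]
  | cons c rest ih =>
    intro res st af
    by_cases hc : c = '-'
    · rw [List.foldl_cons, show stepB (res, st, af) c = (res, true, true) from by simp [stepB, hc],
        ih]
      simp [bGo, hc]
    · rw [List.foldl_cons,
        show stepB (res, st, af) c
            = (res ++ [if st && af then PySem.Chars.upperChar c else PySem.Chars.lowerChar c], st, false)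
          from by simp [stepB, hc],
        ih]
      simp [bGo, hc]

lemma bGo_started_false (l : List Char) : bGo true false l = bGo false false l := by
  induction l with
  | nil => rfl
  | cons c rest ih =>
    by_cases hc : c = '-' <;> simp [bGo, hc, ih]

lemma bGo_split (l : List Char) :
    bGo false false l = PySem.Chars.lower (split1 l).1 ++ ((split1 l).2.map capA).flatten
    ∧ bGo true true l = capA (split1 l).1 ++ ((split1 l).2.map capA).flatten := by
  induction l with
  | nil => simp [bGo, split1, capA, PySem.Chars.lower]
  | cons c rest ih =>
    by_cases hc : c = '-'
    · constructor
      · simp [bGo, hc, split1, ih.2, PySem.Chars.lower, capA]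
      · simp [bGo, hc, split1, ih.2, capA]
    · constructor
      · simp [bGo, hc, split1, ih.1, PySem.Chars.lower]
      · simp [bGo, hc, split1, bGo_started_false, ih.1, capA, PySem.Chars.lower]

-- ===== VERDICT (by name: the statement is the Claim_ definition above) =====
theorem to_second_from_first_spec : Claim_equal_to_second_from_first := by
  intro s _
  show _ = _
  have hB : to_second_from_first_alt s
      = String.ofList (s.toList.foldl stepB ([], false, false)).1 := rfl
  rw [hB, A_chars, foldB s.toList [] false false, (bGo_split s.toList).1]
  simp
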